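-- pv_equiv track=rewrite | github.com/erichaase/topcoder-python | topcoder/colorful_rabbits.py | solution
-- ===== SOURCE A (Python) =====
-- import math
--
-- def solution (replies):
--     # track count of groups of colors
--     h = {}
--     for c in replies:
--         if c+1 in h:
--             h[c+1] += 1
--         else:
--             h[c+1] = 1
--
--     # calculate n assuming minimal groups
--     n = 0
--     for s, c in h.items():
--         n += s * int(math.ceil(float(c) / s))
--     return n
-- ===== SOURCE B (Python) =====
-- def solution(replies):
--     # sort, then run-length scan over equal consecutive values;
--     # each run of length r of value v needs (v+1) * ceil(r/(v+1)) rabbits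
--     total = 0
--     prev = None
--     run = 0
--     for v in sorted(replies):
--         if v == prev:
--             run += 1
--         else:
--             if run:
--                 total += (prev + 1) * -((-run) // (prev + 1))
--             prev, run = v, 1
--     if run:
--         total += (prev + 1) * -((-run) // (prev + 1))
--     return total
-- ===== Notes on version B (the rewrite author's own statement) =====
-- stated objective: alternative
-- what changed: B replaces A's hash-dict counting pass plus dict-items sum by sorting the replies and doing one run-length scan over equal consecutive values, adding (v+1)*ceil(run/(v+1)) per run with integer ceiling division instead of math.ceil on a float.
import Mathlib
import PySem

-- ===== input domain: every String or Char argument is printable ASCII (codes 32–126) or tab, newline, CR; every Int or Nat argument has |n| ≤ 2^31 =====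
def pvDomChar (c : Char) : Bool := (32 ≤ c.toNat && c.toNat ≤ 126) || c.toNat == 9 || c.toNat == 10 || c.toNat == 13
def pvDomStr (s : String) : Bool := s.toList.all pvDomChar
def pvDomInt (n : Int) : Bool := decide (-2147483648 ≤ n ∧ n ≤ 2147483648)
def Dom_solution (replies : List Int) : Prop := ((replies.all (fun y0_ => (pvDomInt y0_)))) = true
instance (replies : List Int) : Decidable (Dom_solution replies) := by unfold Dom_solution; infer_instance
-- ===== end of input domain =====

-- B sorts and run-length scans instead of A's dict counting pass; equal return value is proved on Pre_ (no reply equal to -1).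

-- ===== PORT A =====
-- int(math.ceil(float(c)/s)) is ported as the exact integer ceiling division -((-c) // s);
-- it agrees with the float computation at the count/size magnitudes that arise here.
def pvCeilDiv (c s : Int) : Int := -(PySem.Int.floordiv (-c) s)

-- for c in replies: if c+1 in h: h[c+1] += 1 else: h[c+1] = 1
def pvBuild (replies : List Int) : PySem.Dict Int Int :=
  replies.foldl
    (fun h c => if h.contains (c + 1) then h.insert (c + 1) (h.getD (c + 1) 0 + 1)
                else h.insert (c + 1) 1) PySem.Dict.empty

-- for s, c in h.items(): n += s * ceil(c / s)
def solution (replies : List Int) : Int :=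
  (pvBuild replies).items.foldl (fun n sc => n + sc.1 * pvCeilDiv sc.2 sc.1) 0

-- ===== PORT B =====
-- one run's contribution: (prev+1) * ceil(run / (prev+1))
def pvRunTerm (prev run : Int) : Int := (prev + 1) * pvCeilDiv run (prev + 1)

-- loop body over the sorted list; state = (prev : Option Int, run, total); prev = none models Python's None
def pvBStep (st : Option Int × Int × Int) (v : Int) : Option Int × Int × Int :=
  if some v = st.1 then (st.1, st.2.1 + 1, st.2.2)
  else (some v, 1, if st.2.1 ≠ 0 then st.2.2 + pvRunTerm (st.1.getD 0) st.2.1 else st.2.2)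
  -- st.1.getD 0: when run ≠ 0, prev has been set (is some), so the default is never used

-- the trailing 'if run: total += …; return total'
def pvFlush (st : Option Int × Int × Int) : Int :=
  if st.2.1 ≠ 0 then st.2.2 + pvRunTerm (st.1.getD 0) st.2.1 else st.2.2

def solution_alt (replies : List Int) : Int :=
  pvFlush ((PySem.List.sorted replies (fun x => x) false).foldl pvBStep (none, 0, 0))

-- ===== PRECONDITION & SPEC =====
-- Pre_ excludes exactly the inputs containing a reply of -1, on which Python A (and B) raise ZeroDivisionError.
def Pre_solution (replies : List Int) : Prop := (-1 : Int) ∉ replies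
instance (replies : List Int) : Decidable (Pre_solution replies) := by unfold Pre_solution; infer_instance
def pvWitness_solution : List Int := [0, 0, 2, 2, 2, 1]

def Spec_solution (replies : List Int) (out : Int) : Prop := out = solution_alt replies
instance (replies : List Int) (out : Int) : Decidable (Spec_solution replies out) := by unfold Spec_solution; infer_instance

-- ===== CLAIM (what is proved, stated in full; the proofs are below) =====
def Claim_equal_solution : Prop := ∀ (replies : List Int), Dom_solution replies → Pre_solution replies → Spec_solution replies (solution replies)

-- ===== LEMMAS AND PROOFS =====

-- the common middle form: sum over the distinct reply values
def pvTally (replies : List Int) : Int :=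
  ∑ v ∈ replies.toFinset, pvRunTerm v (replies.count v)

-- ---- A side ----

theorem pvBuild_eq_counter (replies : List Int) :
    pvBuild replies = PySem.Dict.counter (replies.map (· + 1)) := by
  unfold pvBuild
  rw [← PySem.Dict.foldl_insert_getD_add_one_eq_counter, List.foldl_map]
  have hstep : (fun (h : PySem.Dict Int Int) (c : Int) =>
      if h.contains (c + 1) then h.insert (c + 1) (h.getD (c + 1) 0 + 1)
      else h.insert (c + 1) 1)
      = fun (h : PySem.Dict Int Int) (c : Int) => h.insert (c + 1) (h.getD (c + 1) 0 + 1) := by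
    funext h c
    by_cases hc : h.contains (c + 1)
    · simp [hc]
    · have h0 : h.getD (c + 1) 0 = 0 :=
        PySem.Dict.getD_of_not_contains _ _ (by simpa using hc)
      simp [hc, h0]
  rw [hstep]

theorem pvA_eq_tally (replies : List Int) : solution replies = pvTally replies := by
  unfold solution
  rw [pvBuild_eq_counter, PySem.Dict.items_counter,
      PySem.List.foldl_add (g := fun sc : Int × Int => sc.1 * pvCeilDiv sc.2 sc.1)]
  rw [List.map_map]
  simp only [Function.comp_def]
  have hnd : (PySem.Set.ofList (replies.map (· + 1))).Nodup := PySem.Set.nodup_ofList _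
  have hfin : (PySem.Set.ofList (replies.map (· + 1))).toFinset = (replies.map (· + 1)).toFinset := by
    ext x
    simp [PySem.Set.mem_ofList]
  have hsum := List.sum_toFinset
      (f := fun k : Int => k * pvCeilDiv ((replies.map (· + 1)).count k) k) hnd
  rw [hfin] at hsum
  have himg : (replies.map (· + 1)).toFinset = replies.toFinset.image (· + 1) := by
    ext y
    simp
    constructor
    · rintro ⟨a, ha, h⟩
      have : y + -1 = a := by omega
      rwa [this]
    · intro h
      exact ⟨y + -1, h, by ring⟩
  rw [← hsum, himg]
  rw [Finset.sum_image (by intro a _ b _ h; omega :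
      ∀ x ∈ replies.toFinset, ∀ y ∈ replies.toFinset, x + 1 = y + 1 → x = y)]
  unfold pvTally
  rw [zero_add]
  refine Finset.sum_congr rfl ?_
  intro v _
  have hc : (replies.map (· + 1)).count (v + 1) = replies.count v :=
    List.count_map_of_injective replies (fun x => x + 1) (fun a b h => by simpa using h) v
  rw [hc]
  rfl

-- ---- B side ----

theorem pvB_run (zs : List Int) : zs.Pairwise (· ≤ ·) → ∀ (p r t : Int), 0 < r →
    (∀ x ∈ zs, p ≤ x) →
    pvFlush (zs.foldl pvBStep (some p, r, t))
      = t + pvRunTerm p (r + zs.count p) + ∑ v ∈ zs.toFinset.erase p, pvRunTerm v (zs.count v) := by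
  induction zs with
  | nil =>
    intro _ p r t hr _
    simp [pvFlush, hr.ne']
  | cons x rest ih =>
    intro hpw p r t hr hle
    have hx : ∀ y ∈ rest, x ≤ y := fun y hy => List.rel_of_pairwise_cons hpw hy
    have hpw' : rest.Pairwise (· ≤ ·) := hpw.of_cons
    by_cases hxp : x = p
    · subst hxp
      have hstep : pvBStep (some x, r, t) x = (some x, r + 1, t) := by
        simp [pvBStep]
      rw [List.foldl_cons, hstep, ih hpw' x (r + 1) t (by omega) hx]
      have hfs : (x :: rest).toFinset.erase x = rest.toFinset.erase x := by
        simp [List.toFinset_cons, Finset.erase_insert_eq_erase]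
      rw [hfs]
      have h1 : r + 1 + (rest.count x : Int) = r + ((x :: rest).count x : Int) := by
        simp
        ring
      rw [h1]
      congr 1
      refine Finset.sum_congr rfl ?_
      intro v hv
      have hvx : x ≠ v := Ne.symm (Finset.mem_erase.mp hv).1
      simp [hvx]
    · have hplt : p < x := lt_of_le_of_ne (hle x (by simp)) (fun h => hxp h.symm)
      have hpnot : p ∉ x :: rest := by
        intro hmem
        rcases List.mem_cons.mp hmem with h | h
        · exact hxp h.symm
        · exact absurd (hx p h) (by omega)
      have hstep : pvBStep (some p, r, t) x = (some x, 1, t + pvRunTerm p r) := by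
        simp [pvBStep, hxp, hr.ne']
      rw [List.foldl_cons, hstep,
          ih hpw' x 1 (t + pvRunTerm p r) (by omega) hx]
      have hcp : (x :: rest).count p = 0 := List.count_eq_zero_of_not_mem hpnot
      have hfse : (x :: rest).toFinset.erase p = (x :: rest).toFinset :=
        Finset.erase_eq_of_notMem (by simpa using hpnot)
      rw [hcp, hfse]
      have hins : (x :: rest).toFinset = insert x (rest.toFinset.erase x) := by
        ext y
        simp [List.toFinset_cons, Finset.mem_insert, Finset.mem_erase]
        tauto
      rw [hins, Finset.sum_insert (Finset.notMem_erase x _)]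
      have hrest : ∑ v ∈ rest.toFinset.erase x, pvRunTerm v ((x :: rest).count v)
          = ∑ v ∈ rest.toFinset.erase x, pvRunTerm v (rest.count v) := by
        refine Finset.sum_congr rfl ?_
        intro v hv
        simp [Ne.symm (Finset.mem_erase.mp hv).1]
      rw [hrest]
      have h1 : (1 : Int) + (rest.count x : Int) = ((x :: rest).count x : Int) := by
        simp
        ring
      rw [h1]
      push_cast
      ring

theorem pvB_eq_tally (replies : List Int) : solution_alt replies = pvTally replies := by
  unfold solution_alt
  have hperm : (PySem.List.sorted replies (fun x => x) false).Perm replies :=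
    PySem.List.sorted_perm replies _ false
  have hpw : (PySem.List.sorted replies (fun x => x) false).Pairwise (· ≤ ·) := by
    simpa using PySem.List.sorted_pairwise replies (fun x => x)
  have hfin : (PySem.List.sorted replies (fun x => x) false).toFinset = replies.toFinset :=
    by ext y; simp [hperm.mem_iff]
  have htal : pvTally (PySem.List.sorted replies (fun x => x) false) = pvTally replies := by
    unfold pvTally
    rw [hfin]
    refine Finset.sum_congr rfl ?_
    intro v _
    rw [hperm.count_eq]
  rw [← htal]
  cases hzs : PySem.List.sorted replies (fun x => x) false with
  | nil => simp [pvTally, pvFlush]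
  | cons z zr =>
    have hpw' : (z :: zr).Pairwise (· ≤ ·) := hzs ▸ hpw
    have hz : ∀ x ∈ zr, z ≤ x := fun x hx => List.rel_of_pairwise_cons hpw' hx
    have hstep : pvBStep (none, 0, 0) z = (some z, 1, 0) := by simp [pvBStep]
    rw [List.foldl_cons, hstep, pvB_run zr hpw'.of_cons z 1 0 (by omega) hz]
    unfold pvTally
    have hins : (z :: zr).toFinset = insert z (zr.toFinset.erase z) := by
      ext y
      simp [List.toFinset_cons, Finset.mem_insert, Finset.mem_erase]
      tauto
    rw [hins, Finset.sum_insert (Finset.notMem_erase z _)]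
    have hrest : ∑ v ∈ zr.toFinset.erase z, pvRunTerm v ((z :: zr).count v)
        = ∑ v ∈ zr.toFinset.erase z, pvRunTerm v (zr.count v) := by
      refine Finset.sum_congr rfl ?_
      intro v hv
      simp [Ne.symm (Finset.mem_erase.mp hv).1]
    rw [hrest]
    have h1 : (1 : Int) + (zr.count z : Int) = ((z :: zr).count z : Int) := by
      simp
      ring
    rw [h1]
    ring

-- ===== VERDICT (by name: the statement is the Claim_ definition above) =====
theorem solution_spec : Claim_equal_solution := by
  intro replies _ _
  unfold Spec_solution
  rw [pvA_eq_tally, pvB_eq_tally]
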